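-- pv_equiv track=rewrite | github.com/Lu88991/RL_Project2_LI-YIFENG-21262120-LU-ZHIJIE-21229867 | coding/coding_no_rules/play.py | _global_rc_to_idx
-- ===== SOURCE A (Python) =====
-- from typing import Optional
--
-- _BOARD_ORIGIN = {
--     0: (0, 4),
--     1: (4, 2),
--     2: (4, 6),
--     3: (8, 0),
--     4: (8, 4),
--     5: (8, 8),
-- }
--
-- def _global_rc_to_idx(gr: int, gc: int) -> Optional[int]:
--     if not (0 <= gr < 12 and 0 <= gc < 12):
--         return None
--     for b, (br, bc) in _BOARD_ORIGIN.items():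
--         if br <= gr < br + 4 and bc <= gc < bc + 4:
--             r = gr - br
--             c = gc - bc
--             return b * 16 + r * 4 + c
--     return None
-- ===== SOURCE B (Python) =====
-- from typing import Optional
--
-- def _global_rc_to_idx(g_r: int, g_c: int) -> Optional[int]:
--     if not (0 <= g_r < 12 and 0 <= g_c < 12):
--         return None
--     if g_r < 4:
--         if 4 <= g_c < 8:
--             return g_r * 4 + (g_c - 4)
--         return None
--     if g_r < 8:
--         if 2 <= g_c < 6:
--             return 16 + (g_r - 4) * 4 + (g_c - 2)
--         if 6 <= g_c < 10:
--             return 32 + (g_r - 4) * 4 + (g_c - 6)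
--         return None
--     if g_c < 4:
--         return 48 + (g_r - 8) * 4 + g_c
--     if g_c < 8:
--         return 64 + (g_r - 8) * 4 + (g_c - 4)
--     return 80 + (g_r - 8) * 4 + (g_c - 8)
-- ===== Notes on version B (the rewrite author's own statement) =====
-- stated objective: simpler
-- what changed: Replaced the scan over the _BOARD_ORIGIN dict with closed-form arithmetic: branch on the row band (gr//4) and the column range to compute the block index and offset directly, no table and no loop.
import Mathlib
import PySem

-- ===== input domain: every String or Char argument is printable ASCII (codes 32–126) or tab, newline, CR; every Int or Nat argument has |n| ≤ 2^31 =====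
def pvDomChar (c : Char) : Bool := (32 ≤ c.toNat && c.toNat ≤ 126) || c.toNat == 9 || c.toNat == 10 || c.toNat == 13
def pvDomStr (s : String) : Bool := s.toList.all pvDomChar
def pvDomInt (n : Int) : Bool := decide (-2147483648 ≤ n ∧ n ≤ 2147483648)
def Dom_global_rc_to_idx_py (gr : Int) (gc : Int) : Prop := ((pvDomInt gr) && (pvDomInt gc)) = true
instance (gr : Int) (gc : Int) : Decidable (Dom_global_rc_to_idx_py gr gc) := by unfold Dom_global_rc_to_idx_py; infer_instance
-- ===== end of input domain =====

-- B replaces A's scan over the _BOARD_ORIGIN table with closed-form branch arithmetic (objective: simpler).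

-- ===== PORT A =====
-- the _BOARD_ORIGIN dict as an insertion-ordered association list
def pvBoardOrigin : List (Int × (Int × Int)) :=
  [(0, (0, 4)), (1, (4, 2)), (2, (4, 6)), (3, (8, 0)), (4, (8, 4)), (5, (8, 8))]

-- the for-loop over _BOARD_ORIGIN.items(): first matching block returns, fall-through gives none
def pvOriginLoop (gr : Int) (gc : Int) : List (Int × (Int × Int)) → Option Int
  | [] => none
  | (b, (br, bc)) :: rest =>
      if br ≤ gr ∧ gr < br + 4 ∧ bc ≤ gc ∧ gc < bc + 4 then
        some (b * 16 + (gr - br) * 4 + (gc - bc))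
      else
        pvOriginLoop gr gc rest

def global_rc_to_idx_py (gr : Int) (gc : Int) : Option Int :=
  if ¬(0 ≤ gr ∧ gr < 12 ∧ 0 ≤ gc ∧ gc < 12) then none
  else pvOriginLoop gr gc pvBoardOrigin

-- ===== PORT B =====
def global_rc_to_idx_py_alt (gr : Int) (gc : Int) : Option Int :=
  if ¬(0 ≤ gr ∧ gr < 12 ∧ 0 ≤ gc ∧ gc < 12) then none
  else if gr < 4 then
    if 4 ≤ gc ∧ gc < 8 then some (gr * 4 + (gc - 4)) else none
  else if gr < 8 then
    if 2 ≤ gc ∧ gc < 6 then some (16 + (gr - 4) * 4 + (gc - 2))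
    else if 6 ≤ gc ∧ gc < 10 then some (32 + (gr - 4) * 4 + (gc - 6))
    else none
  else if gc < 4 then some (48 + (gr - 8) * 4 + gc)
  else if gc < 8 then some (64 + (gr - 8) * 4 + (gc - 4))
  else some (80 + (gr - 8) * 4 + (gc - 8))

-- ===== PRECONDITION & SPEC =====
def Spec_global_rc_to_idx_py (gr : Int) (gc : Int) (out : Option Int) : Prop := out = global_rc_to_idx_py_alt gr gc
instance (gr : Int) (gc : Int) (out : Option Int) : Decidable (Spec_global_rc_to_idx_py gr gc out) := by unfold Spec_global_rc_to_idx_py; infer_instance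

-- ===== CLAIM (what is proved, stated in full; the proofs are below) =====
def Claim_equal_global_rc_to_idx_py : Prop := ∀ (gr : Int) (gc : Int), Dom_global_rc_to_idx_py gr gc → Spec_global_rc_to_idx_py gr gc (global_rc_to_idx_py gr gc)

-- ===== LEMMAS AND PROOFS =====

-- ===== VERDICT (by name: the statement is the Claim_ definition above) =====
theorem global_rc_to_idx_py_spec : Claim_equal_global_rc_to_idx_py := by
  intro gr gc _
  unfold Spec_global_rc_to_idx_py global_rc_to_idx_py global_rc_to_idx_py_alt
  by_cases h : 0 ≤ gr ∧ gr < 12 ∧ 0 ≤ gc ∧ gc < 12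
  · rw [if_neg (not_not_intro h), if_neg (not_not_intro h)]
    obtain ⟨h1, h2, h3, h4⟩ := h
    interval_cases gr <;> interval_cases gc <;> decide
  · rw [if_pos h, if_pos h]
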